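-- pv_equiv track=rewrite | github.com/vhiribarren/advent-of-code | 2023/python/day_13.py | generate_hashed_patterns
-- ===== SOURCE A (Python) =====
-- def generate_hashed_patterns(input: str) -> list[(list[int], list[int])]:
--     hashed_patterns = []
--     current_rows = []
--     current_cols = []
--     current_row_idx = 0
--     for line in input.splitlines():
--         if len(line) == 0:
--             hashed_patterns.append((current_rows, current_cols))
--             current_rows = []
--             current_cols = []
--             current_row_idx = 0
--             continue
--         for current_col_idx, c in enumerate(line):
--             if len(current_rows) <= current_row_idx:
--                 current_rows.insert(current_row_idx, 0)
--             if len(current_cols) <= current_col_idx: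
--                 current_cols.insert(current_col_idx, 0)
--             if c == "#":
--                 current_rows[current_row_idx] += pow(2, current_col_idx)
--                 current_cols[current_col_idx] += pow(2, current_row_idx)
--         current_row_idx += 1
--     hashed_patterns.append((current_rows, current_cols))
--
--     return hashed_patterns
-- ===== SOURCE B (Python) =====
-- def generate_hashed_patterns(input: str) -> list[(list[int], list[int])]:
--     # Partition lines into blocks first, then hash each block independently.
--     blocks = []
--     current = []
--     for line in input.splitlines():
--         if len(line) == 0:
--             blocks.append(current)
--             current = []
--         else:
--             current.append(line)
--     blocks.append(current)
--
--     def hash_block(block):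
--         rows = [sum(2 ** j for j, c in enumerate(line) if c == "#") for line in block]
--         width = max((len(line) for line in block), default=0)
--         cols = [
--             sum(2 ** i for i, line in enumerate(block) if j < len(line) and line[j] == "#")
--             for j in range(width)
--         ]
--         return (rows, cols)
--
--     return [hash_block(block) for block in blocks]
-- ===== Notes on version B (the rewrite author's own statement) =====
-- stated objective: simpler
-- what changed: B first partitions the lines into blocks (flushing on blank lines plus one final flush) and then hashes each block independently with comprehensions, building the column masks column-major over range(max width), which removes A's current_row_idx counter and insert-to-grow row/col bookkeeping from the single stateful scan.
import Mathlib
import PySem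

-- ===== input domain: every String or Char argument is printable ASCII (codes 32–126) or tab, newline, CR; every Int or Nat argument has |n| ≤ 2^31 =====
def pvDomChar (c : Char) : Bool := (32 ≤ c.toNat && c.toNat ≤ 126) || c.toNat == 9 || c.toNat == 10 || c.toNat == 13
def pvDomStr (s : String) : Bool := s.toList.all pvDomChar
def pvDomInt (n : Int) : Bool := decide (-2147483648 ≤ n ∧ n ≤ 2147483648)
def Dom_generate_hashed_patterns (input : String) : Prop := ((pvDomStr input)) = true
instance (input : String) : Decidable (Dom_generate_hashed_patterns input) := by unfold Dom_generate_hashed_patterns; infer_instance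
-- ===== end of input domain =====

-- B replaces A's single stateful scan (insert-to-grow row/col bookkeeping) by a partition of the
-- lines into blocks followed by per-block comprehensions that build the column masks column-major.

-- ===== PORT A =====
-- one iteration of A's inner `for current_col_idx, c in enumerate(line)`, restricted to the
-- current_rows list (the rows and cols updates of the loop body are independent of each other)
def aRowStep (idx : Int) (rows : List Int) (p : Int × Char) : List Int :=
  let rows := if (rows.length : Int) ≤ idx then PySem.List.insert rows idx 0 else rows
  if p.2 == '#' then
    PySem.List.pySetD rows idx (PySem.List.pyGetD rows idx 0 + 2 ^ p.1.toNat)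
  else rows

-- the same iteration restricted to the current_cols list
def aColStep (idx : Int) (cols : List Int) (p : Int × Char) : List Int :=
  let cols := if (cols.length : Int) ≤ p.1 then PySem.List.insert cols p.1 0 else cols
  if p.2 == '#' then
    PySem.List.pySetD cols p.1 (PySem.List.pyGetD cols p.1 0 + 2 ^ idx.toNat)
  else cols

-- A's outer loop body; state = (hashed_patterns, current_rows, current_cols, current_row_idx)
def aStep (st : List (List Int × List Int) × List Int × List Int × Int) (line : String) :
    List (List Int × List Int) × List Int × List Int × Int :=
  if PySem.Str.len line == 0 then
    (st.1 ++ [(st.2.1, st.2.2.1)], [], [], 0)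
  else
    let rc := (PySem.List.enumerate line.toList).foldl
      (fun rc p => (aRowStep st.2.2.2 rc.1 p, aColStep st.2.2.2 rc.2 p)) (st.2.1, st.2.2.1)
    (st.1, rc.1, rc.2, st.2.2.2 + 1)

def generate_hashed_patterns (input : String) : List (List Int × List Int) :=
  let st := (PySem.Str.splitlines input).foldl aStep ([], [], [], 0)
  st.1 ++ [(st.2.1, st.2.2.1)]

-- ===== PORT B =====
-- rows[i] = sum(2**j for j, c in enumerate(line) if c == "#")
def bRowVal (line : String) : Int :=
  (((PySem.List.enumerate line.toList).filter (fun p => p.2 == '#')).map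
    (fun p => (2 : Int) ^ p.1.toNat)).sum

-- cols[j] = sum(2**i for i, line in enumerate(block) if j < len(line) and line[j] == "#")
def bColVal (block : List String) (j : Int) : Int :=
  (((PySem.List.enumerate block).filter
      (fun p => decide (j < PySem.Str.len p.2) && (PySem.List.pyGetD p.2.toList j ' ' == '#'))).map
    (fun p => (2 : Int) ^ p.1.toNat)).sum

def bHashBlock (block : List String) : List Int × List Int :=
  (block.map bRowVal,
   (PySem.List.pyRange 0 (PySem.List.maxD (block.map PySem.Str.len) (fun x => x) 0) 1).map
     (bColVal block))

-- split the lines into blocks: flush current on each blank line, plus one final flush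
def bBlocks (lines : List String) : List (List String) :=
  let st := lines.foldl
    (fun (st : List (List String) × List String) line =>
      if PySem.Str.len line == 0 then (st.1 ++ [st.2], []) else (st.1, st.2 ++ [line]))
    ([], [])
  st.1 ++ [st.2]

def generate_hashed_patterns_alt (input : String) : List (List Int × List Int) :=
  (bBlocks (PySem.Str.splitlines input)).map bHashBlock

-- ===== PRECONDITION & SPEC =====
def Spec_generate_hashed_patterns (input : String) (out : List (List Int × List Int)) : Prop := out = generate_hashed_patterns_alt input
instance (input : String) (out : List (List Int × List Int)) : Decidable (Spec_generate_hashed_patterns input out) := by unfold Spec_generate_hashed_patterns; infer_instance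

-- ===== CLAIM (what is proved, stated in full; the proofs are below) =====
def Claim_equal_generate_hashed_patterns : Prop := ∀ (input : String), Dom_generate_hashed_patterns input → Spec_generate_hashed_patterns input (generate_hashed_patterns input)

-- ===== LEMMAS AND PROOFS =====

-- row value of a line whose characters carry exponents j, j+1, …
def rvFrom (j : Nat) : List Char → Int
  | [] => 0
  | c :: cs => (if c = '#' then (2 : Int) ^ j else 0) + rvFrom (j + 1) cs

-- effect of A's inner loop on the cols list for one line processed as row number i
def mergeC (i : Nat) : List Char → List Int → List Int
  | [], vs => vs
  | c :: cs, [] => (if c = '#' then (2 : Int) ^ i else 0) :: mergeC i cs []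
  | c :: cs, v :: vs => (v + if c = '#' then (2 : Int) ^ i else 0) :: mergeC i cs vs

-- cols list after processing a whole block, first line numbered i
def acolsGo (i : Nat) : List String → List Int → List Int
  | [], cols => cols
  | l :: ls, cols => acolsGo (i + 1) ls (mergeC i l.toList cols)

-- contribution of a block (rows numbered i, i+1, …) to column j
def colSumFrom (i j : Nat) : List String → Int
  | [] => 0
  | l :: ls =>
      (if j < l.toList.length ∧ l.toList.getD j ' ' = '#' then (2 : Int) ^ i else 0) +
        colSumFrom (i + 1) j ls

-- functional form of B's block splitter
def sGo (acc : List String) : List String → List (List String)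
  | [] => [acc]
  | l :: ls => if l.toList = [] then acc :: sGo [] ls else sGo (acc ++ [l]) ls

lemma len_beq_zero (line : String) :
    (PySem.Str.len line == 0) = decide (line.toList = []) := by
  rw [PySem.Str.len_eq]
  cases h : line.toList <;> simp [h] <;> omega

lemma rows_fold_from (cs : List Char) : ∀ (j : Nat) (rows : List Int) (v : Int),
    (PySem.List.enumerate cs (j : Int)).foldl (aRowStep (rows.length : Int)) (rows ++ [v]) =
      rows ++ [v + rvFrom j cs] := by
  induction cs with
  | nil => intro j rows v; simp [PySem.List.enumerate, rvFrom]
  | cons c cs ih =>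
    intro j rows v
    rw [PySem.List.enumerate_cons, List.foldl_cons]
    have hstep : aRowStep (rows.length : Int) (rows ++ [v]) ((j : Int), c) =
        rows ++ [v + if c = '#' then (2 : Int) ^ j else 0] := by
      have hne : ¬ (((rows ++ [v]).length : Int) ≤ (rows.length : Int)) := by
        simp
      simp only [aRowStep, if_neg hne]
      by_cases hc : c = '#'
      · simp [hc, List.set_append_right]
      · simp [hc]
    rw [hstep]
    have hcast : ((j : Int) + 1) = ((j + 1 : Nat) : Int) := by push_cast; ring
    rw [hcast, ih (j + 1) rows (v + if c = '#' then (2 : Int) ^ j else 0)]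
    simp [rvFrom, add_assoc]

lemma line_rows (cs : List Char) (rows : List Int) (h : cs ≠ []) :
    (PySem.List.enumerate cs).foldl (aRowStep (rows.length : Int)) rows =
      rows ++ [rvFrom 0 cs] := by
  match cs, h with
  | c :: cs, _ =>
    rw [PySem.List.enumerate_cons, List.foldl_cons]
    have hstep : aRowStep (rows.length : Int) rows ((0 : Int), c) =
        rows ++ [if c = '#' then (2 : Int) ^ (0 : Nat) else 0] := by
      simp only [aRowStep, if_pos (le_refl ((rows.length : Int))), PySem.List.insert_length]
      by_cases hc : c = '#'
      · simp [hc, List.set_append_right]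
      · simp [hc]
    rw [hstep]
    have hcast : ((0 : Int) + 1) = ((1 : Nat) : Int) := by norm_num
    rw [hcast, rows_fold_from cs 1 rows _]
    simp [rvFrom]

lemma cols_fold_from (cs : List Char) : ∀ (pre cols : List Int) (i : Nat),
    (PySem.List.enumerate cs (pre.length : Int)).foldl (aColStep (i : Int)) (pre ++ cols) =
      pre ++ mergeC i cs cols := by
  induction cs with
  | nil => intro pre cols i; simp [PySem.List.enumerate, mergeC]
  | cons c cs ih =>
    intro pre cols i
    rw [PySem.List.enumerate_cons, List.foldl_cons]
    cases cols with
    | nil =>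
      have hstep : aColStep (i : Int) (pre ++ []) ((pre.length : Int), c) =
          pre ++ [if c = '#' then (2 : Int) ^ i else 0] := by
        simp only [aColStep, List.append_nil, if_pos (le_refl ((pre.length : Int))),
          PySem.List.insert_length]
        by_cases hc : c = '#'
        · simp [hc, List.set_append_right]
        · simp [hc]
      rw [hstep]
      have hcast : ((pre.length : Int) + 1) =
          (((pre ++ [if c = '#' then (2 : Int) ^ i else 0]).length : Nat) : Int) := by
        simp
      rw [hcast]
      have hih := ih (pre ++ [if c = '#' then (2 : Int) ^ i else 0]) [] i
      simp only [List.append_nil] at hih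
      rw [hih]
      simp [mergeC]
    | cons v vs =>
      have hne : ¬ (((pre ++ v :: vs).length : Int) ≤ (pre.length : Int)) := by simp
      have hstep : aColStep (i : Int) (pre ++ v :: vs) ((pre.length : Int), c) =
          (pre ++ [v + if c = '#' then (2 : Int) ^ i else 0]) ++ vs := by
        simp only [aColStep, if_neg hne]
        by_cases hc : c = '#'
        · simp [hc, List.set_append_right]
        · simp [hc]
      rw [hstep]
      have hcast : ((pre.length : Int) + 1) =
          (((pre ++ [v + if c = '#' then (2 : Int) ^ i else 0]).length : Nat) : Int) := by
        simp
      rw [hcast, ih (pre ++ [v + if c = '#' then (2 : Int) ^ i else 0]) vs i]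
      simp [mergeC]

lemma mergeC_length (i : Nat) (cs : List Char) : ∀ cols : List Int,
    (mergeC i cs cols).length = max cs.length cols.length := by
  induction cs with
  | nil => intro cols; simp [mergeC]
  | cons c cs ih => intro cols; cases cols <;> simp [mergeC, ih]

lemma mergeC_getD (i : Nat) (cs : List Char) : ∀ (cols : List Int) (j : Nat),
    (mergeC i cs cols).getD j 0 =
      cols.getD j 0 + (if j < cs.length ∧ cs.getD j ' ' = '#' then (2 : Int) ^ i else 0) := by
  induction cs with
  | nil => intro cols j; simp [mergeC]
  | cons c cs ih =>
    intro cols j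
    cases cols with
    | nil =>
      cases j with
      | zero => simp [mergeC]
      | succ j => simpa [mergeC, List.getD] using ih [] j
    | cons v vs =>
      cases j with
      | zero => simp [mergeC, List.getD]
      | succ j => simpa [mergeC, List.getD] using ih vs j

lemma acolsGo_length (bs : List String) : ∀ (i : Nat) (cols : List Int),
    (acolsGo i bs cols).length = bs.foldl (fun w l => max w l.toList.length) cols.length := by
  induction bs with
  | nil => intro i cols; simp [acolsGo]
  | cons b bs ih =>
    intro i cols
    simp only [acolsGo, List.foldl_cons, ih, mergeC_length]
    rw [Nat.max_comm]

lemma acolsGo_getD (bs : List String) : ∀ (i : Nat) (cols : List Int) (j : Nat),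
    (acolsGo i bs cols).getD j 0 = cols.getD j 0 + colSumFrom i j bs := by
  induction bs with
  | nil => intro i cols j; simp [acolsGo, colSumFrom]
  | cons b bs ih =>
    intro i cols j
    simp only [acolsGo, colSumFrom]
    rw [ih, mergeC_getD]
    ring

lemma acolsGo_snoc (bs : List String) : ∀ (i : Nat) (l : String) (cols : List Int),
    acolsGo i (bs ++ [l]) cols = mergeC (i + bs.length) l.toList (acolsGo i bs cols) := by
  induction bs with
  | nil => intro i l cols; simp [acolsGo]
  | cons b bs ih =>
    intro i l cols
    simp only [List.cons_append, acolsGo, ih, List.length_cons]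
    rw [show i + 1 + bs.length = i + (bs.length + 1) from by omega]

lemma rv_sum_from (cs : List Char) : ∀ j : Nat,
    (((PySem.List.enumerate cs (j : Int)).filter (fun p => p.2 == '#')).map
      (fun p => (2 : Int) ^ p.1.toNat)).sum = rvFrom j cs := by
  induction cs with
  | nil => intro j; simp [PySem.List.enumerate, rvFrom]
  | cons c cs ih =>
    intro j
    rw [PySem.List.enumerate_cons]
    have hcast : ((j : Int) + 1) = ((j + 1 : Nat) : Int) := by push_cast; ring
    by_cases hc : c = '#' <;>
      simp [hc, rvFrom] <;>
      rw [hcast, ih (j + 1)]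

lemma bRowVal_eq (line : String) : bRowVal line = rvFrom 0 line.toList := by
  simpa using rv_sum_from line.toList 0

lemma colSum_from (block : List String) (j : Nat) : ∀ i : Nat,
    (((PySem.List.enumerate block (i : Int)).filter
        (fun p => decide ((j : Int) < PySem.Str.len p.2) &&
          (PySem.List.pyGetD p.2.toList (j : Int) ' ' == '#'))).map
      (fun p => (2 : Int) ^ p.1.toNat)).sum = colSumFrom i j block := by
  induction block with
  | nil => intro i; simp [PySem.List.enumerate, colSumFrom]
  | cons b bs ih =>
    intro i
    have hcast : ((i : Int) + 1) = ((i + 1 : Nat) : Int) := by push_cast; ring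
    rw [PySem.List.enumerate_cons, hcast, List.filter_cons]
    by_cases hc : j < b.toList.length ∧ b.toList.getD j ' ' = '#'
    · have hb : (decide ((j : Nat) < PySem.Str.len b) &&
          (PySem.List.pyGetD b.toList ((j : Nat) : Int) ' ' == '#')) = true := by
        simp [PySem.Str.len_eq, hc.1, hc.2]
        exact ⟨by simpa using hc.1, by simpa [List.getD] using hc.2⟩
      rw [hb]
      rw [if_pos rfl, List.map_cons, List.sum_cons, ih (i + 1)]
      simp [colSumFrom, hc]
      exact ⟨by simpa using hc.1, by simpa [List.getD] using hc.2⟩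
    · have hb : (decide ((j : Nat) < PySem.Str.len b) &&
          (PySem.List.pyGetD b.toList ((j : Nat) : Int) ' ' == '#')) = false := by
        rcases not_and_or.mp hc with h1 | h2
        · simp [PySem.Str.len_eq, PySem.List.pyGetD_natCast, h1]
          exact fun h => absurd (by simpa using h) h1
        · simp [PySem.Str.len_eq, PySem.List.pyGetD_natCast, h2]
          exact fun _ => by simpa [List.getD] using h2
      rw [hb]
      rw [if_neg (by simp), ih (i + 1)]
      simp [colSumFrom, hc]
      simp only [List.getD, String.length] at hc ⊢
      intro h
      exact fun h2 => hc ⟨by simpa using h, by simpa using h2⟩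

lemma bColVal_eq (block : List String) (j : Nat) :
    bColVal block (j : Int) = colSumFrom 0 j block := by
  simpa [bColVal] using colSum_from block j 0

lemma foldl_max_cast (bs : List String) : ∀ a : Nat,
    ((bs.map PySem.Str.len).foldl max (a : Int)) =
      ((bs.foldl (fun w l => max w l.toList.length) a : Nat) : Int) := by
  induction bs with
  | nil => intro a; simp
  | cons b bs ih =>
    intro a
    simp only [List.map_cons, List.foldl_cons, PySem.Str.len_eq]
    rw [show max (a : Int) (b.toList.length : Int) = ((max a b.toList.length : Nat) : Int) from by
      push_cast; rfl]
    exact ih _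

lemma maxD_widths (block : List String) :
    PySem.List.maxD (block.map PySem.Str.len) (fun x => x) 0 =
      ((block.foldl (fun w l => max w l.toList.length) 0 : Nat) : Int) := by
  cases block with
  | nil => simp [PySem.List.maxD, PySem.List.max?]
  | cons b bs =>
    simp only [PySem.List.maxD, List.map_cons, PySem.List.max?_id_cons, Option.getD_some]
    have h := foldl_max_cast bs b.toList.length
    simp only [PySem.Str.len_eq]
    rw [h]
    simp

lemma hashBlock_eq (block : List String) :
    bHashBlock block = (block.map bRowVal, acolsGo 0 block []) := by
  unfold bHashBlock
  refine Prod.ext rfl ?_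
  rw [maxD_widths, PySem.List.pyRange_zero_natCast, List.map_map]
  apply List.ext_getElem
  · simpa using (acolsGo_length block 0 []).symm
  · intro i h1 h2
    simp only [List.getElem_map, List.getElem_range, Function.comp]
    rw [bColVal_eq]
    have h3 := acolsGo_getD block 0 [] i
    rw [List.getD_eq_getElem _ _ h2] at h3
    simpa using h3.symm

lemma top_fold (lines : List String) :
    ∀ (pats : List (List Int × List Int)) (block : List String),
      (∀ l ∈ block, l.toList ≠ []) →
      (let st := lines.foldl aStep (pats, block.map bRowVal, acolsGo 0 block [], (block.length : Int))
       st.1 ++ [(st.2.1, st.2.2.1)]) = pats ++ (sGo block lines).map bHashBlock := by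
  induction lines with
  | nil =>
    intro pats block _
    simp only [List.foldl_nil, sGo, List.map_cons, List.map_nil]
    rw [hashBlock_eq]
  | cons l ls ih =>
    intro pats block hb
    simp only [List.foldl_cons]
    by_cases hl : l.toList = []
    · have hstep : aStep (pats, block.map bRowVal, acolsGo 0 block [], (block.length : Int)) l =
          (pats ++ [(block.map bRowVal, acolsGo 0 block [])], [], [], 0) := by
        simp [aStep, len_beq_zero, hl]
      rw [hstep]
      have hih := ih (pats ++ [(block.map bRowVal, acolsGo 0 block [])]) [] (by simp)
      simp only [List.map_nil, acolsGo, List.length_nil, Nat.cast_zero] at hih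
      rw [hih]
      simp [sGo, hl, hashBlock_eq]
    · have hstep : aStep (pats, block.map bRowVal, acolsGo 0 block [], (block.length : Int)) l =
          (pats, (block ++ [l]).map bRowVal, acolsGo 0 (block ++ [l]) [],
            ((block ++ [l]).length : Int)) := by
        simp only [aStep, len_beq_zero, hl, decide_false, if_neg]
        rw [PySem.List.foldl_prod_mk
          (f := aRowStep ((block.length : Nat) : Int)) (g := aColStep ((block.length : Nat) : Int))]
        have hrows : (PySem.List.enumerate l.toList).foldl
            (aRowStep ((block.length : Nat) : Int)) (block.map bRowVal) =
            (block ++ [l]).map bRowVal := by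
          have h1 := line_rows l.toList (block.map bRowVal) hl
          rw [List.length_map] at h1
          rw [h1, ← bRowVal_eq]
          simp
        have hcols : (PySem.List.enumerate l.toList).foldl
            (aColStep ((block.length : Nat) : Int)) (acolsGo 0 block []) =
            acolsGo 0 (block ++ [l]) [] := by
          have h2 := cols_fold_from l.toList [] (acolsGo 0 block []) block.length
          simp only [List.length_nil, Nat.cast_zero, List.nil_append] at h2
          rw [h2, acolsGo_snoc]
          simp
        simp [hrows, hcols]
      rw [hstep]
      rw [ih pats (block ++ [l]) (by
        intro x hx
        rcases List.mem_append.mp hx with h | h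
        · exact hb x h
        · simpa [List.mem_singleton.mp h] using hl)]
      simp [sGo, hl]

lemma blocks_fold (lines : List String) : ∀ (blocks : List (List String)) (acc : List String),
    (let st := lines.foldl
        (fun (st : List (List String) × List String) line =>
          if PySem.Str.len line == 0 then (st.1 ++ [st.2], []) else (st.1, st.2 ++ [line]))
        (blocks, acc)
     st.1 ++ [st.2]) = blocks ++ sGo acc lines := by
  induction lines with
  | nil => intro blocks acc; simp [sGo]
  | cons l ls ih =>
    intro blocks acc
    simp only [List.foldl_cons, sGo, len_beq_zero l]
    by_cases hl : l.toList = []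
    · simp only [hl, decide_true, if_true, ih]
      simp [sGo, hl]
    · simp only [hl, decide_false, if_false, ih]
      simp [sGo]

-- ===== VERDICT (by name: the statement is the Claim_ definition above) =====
theorem generate_hashed_patterns_spec : Claim_equal_generate_hashed_patterns := by
  intro input _
  unfold Spec_generate_hashed_patterns generate_hashed_patterns generate_hashed_patterns_alt bBlocks
  rw [blocks_fold]
  have h := top_fold (PySem.Str.splitlines input) [] [] (by simp)
  simpa [acolsGo] using h
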